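-- pv_equiv track=rewrite | github.com/swarajladke/Neural-Networks | v11_quad_marathon.py | compute_lang_ranges
-- ===== SOURCE A (Python) =====
-- def compute_lang_ranges(langs, base_dim, n_per_lang):
--     ranges = {}
--     ranges[langs[0]] = (0, base_dim)
--     current = base_dim
--     for lang in langs[1:]:
--         ranges[lang] = (current, current + n_per_lang)
--         current += n_per_lang
--     return ranges
-- ===== SOURCE B (Python) =====
-- def compute_lang_ranges(langs, base_dim, n_per_lang):
--     return {
--         lang: ((0, base_dim) if i == 0
--                else (base_dim + (i - 1) * n_per_lang, base_dim + i * n_per_lang))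
--         for i, lang in enumerate(langs)
--     }
-- ===== Notes on version B (the rewrite author's own statement) =====
-- stated objective: simpler
-- what changed: Replaces the running-offset accumulator loop with a single dict comprehension over enumerate(langs) that computes each language's range in closed form from its index.
import Mathlib
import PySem

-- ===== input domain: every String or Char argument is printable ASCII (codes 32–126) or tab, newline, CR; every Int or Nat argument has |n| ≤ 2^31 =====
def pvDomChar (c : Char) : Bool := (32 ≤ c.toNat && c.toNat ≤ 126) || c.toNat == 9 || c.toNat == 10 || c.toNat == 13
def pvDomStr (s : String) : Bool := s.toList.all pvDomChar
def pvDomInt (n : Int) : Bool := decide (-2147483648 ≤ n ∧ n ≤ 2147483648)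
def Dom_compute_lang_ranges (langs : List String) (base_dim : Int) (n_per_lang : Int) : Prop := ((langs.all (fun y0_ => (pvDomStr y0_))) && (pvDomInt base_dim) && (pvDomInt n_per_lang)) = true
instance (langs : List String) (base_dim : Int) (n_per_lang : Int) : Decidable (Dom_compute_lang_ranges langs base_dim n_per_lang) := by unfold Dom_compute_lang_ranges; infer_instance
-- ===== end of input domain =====

-- B replaces A's running-offset accumulator with closed-form index arithmetic over enumerate (objective: simpler).

-- ===== PORT A =====
-- ranges = {}; ranges[langs[0]] = (0, base_dim); current = base_dim;
-- for lang in langs[1:]: ranges[lang] = (current, current + n_per_lang); current += n_per_lang; return ranges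
def compute_lang_ranges (langs : List String) (base_dim : Int) (n_per_lang : Int) : List (String × Int × Int) :=
  match PySem.List.pyGet? langs 0 with
  | none => []   -- IndexError on empty langs; excluded by Pre_
  | some l0 =>
    let d0 : PySem.Dict String (Int × Int) := PySem.Dict.empty.insert l0 (0, base_dim)
    let res := (PySem.List.slice langs (some 1) none).foldl
      (fun (st : PySem.Dict String (Int × Int) × Int) lang =>
        (st.1.insert lang (st.2, st.2 + n_per_lang), st.2 + n_per_lang))
      (d0, base_dim)
    res.1.items

-- ===== PORT B =====
-- {lang: ((0, base_dim) if i == 0 else (base_dim + (i-1)*n, base_dim + i*n)) for i, lang in enumerate(langs)}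
def compute_lang_ranges_alt (langs : List String) (base_dim : Int) (n_per_lang : Int) : List (String × Int × Int) :=
  ((PySem.List.enumerate langs 0).foldl
    (fun (d : PySem.Dict String (Int × Int)) (p : Int × String) =>
      d.insert p.2
        (if p.1 == 0 then (0, base_dim)
         else (base_dim + (p.1 - 1) * n_per_lang, base_dim + p.1 * n_per_lang)))
    PySem.Dict.empty).items

-- ===== PRECONDITION & SPEC =====
-- A indexes langs[0], so it raises IndexError on the empty list; Pre_ excludes exactly that.
def Pre_compute_lang_ranges (langs : List String) (base_dim : Int) (n_per_lang : Int) : Prop := langs ≠ []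
instance (langs : List String) (base_dim : Int) (n_per_lang : Int) : Decidable (Pre_compute_lang_ranges langs base_dim n_per_lang) := by unfold Pre_compute_lang_ranges; infer_instance
def pvWitness_compute_lang_ranges : List String × Int × Int := (["en", "fr", "en"], 10, 3)

def Spec_compute_lang_ranges (langs : List String) (base_dim : Int) (n_per_lang : Int) (out : List (String × Int × Int)) : Prop := out = compute_lang_ranges_alt langs base_dim n_per_lang
instance (langs : List String) (base_dim : Int) (n_per_lang : Int) (out : List (String × Int × Int)) : Decidable (Spec_compute_lang_ranges langs base_dim n_per_lang out) := by unfold Spec_compute_lang_ranges; infer_instance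

-- ===== CLAIM (what is proved, stated in full; the proofs are below) =====
def Claim_equal_compute_lang_ranges : Prop := ∀ (langs : List String) (base_dim : Int) (n_per_lang : Int), Dom_compute_lang_ranges langs base_dim n_per_lang → Pre_compute_lang_ranges langs base_dim n_per_lang → Spec_compute_lang_ranges langs base_dim n_per_lang (compute_lang_ranges langs base_dim n_per_lang)

-- ===== LEMMAS AND PROOFS =====

-- Loop invariant: A's accumulator fold over the tail, started at current = base + i*n,
-- produces the same dict as B's fold over enumerate started at index i+1.
theorem pv_loop_eq (base n : Int) (rest : List String) :
    ∀ (i : Nat) (d : PySem.Dict String (Int × Int)),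
    (rest.foldl
      (fun (st : PySem.Dict String (Int × Int) × Int) lang =>
        (st.1.insert lang (st.2, st.2 + n), st.2 + n))
      (d, base + i * n)).1
    = (PySem.List.enumerate rest (i + 1)).foldl
        (fun (d : PySem.Dict String (Int × Int)) (p : Int × String) =>
          d.insert p.2
            (if p.1 == 0 then (0, base)
             else (base + (p.1 - 1) * n, base + p.1 * n)))
        d := by
  induction rest with
  | nil => intro i d; simp [PySem.List.enumerate_nil]
  | cons x xs ih =>
    intro i d
    rw [PySem.List.enumerate_cons]
    simp only [List.foldl_cons]
    have h0 : ((i : Int) + 1 == 0) = false := by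
      simp only [beq_eq_false_iff_ne]; omega
    rw [h0]
    have h1 : (i : Int) + 1 - 1 = (i : Int) := by ring
    have h2 : base + ((i : Int) + 1) * n = base + (i : Int) * n + n := by ring
    have h3 : ((i : Nat) + 1 : Int) + 1 = ((i + 1 : Nat) : Int) + 1 := by push_cast; ring
    have := ih (i + 1) (d.insert x (base + i * n, base + i * n + n))
    rw [h1, h2]
    calc (xs.foldl
        (fun (st : PySem.Dict String (Int × Int) × Int) lang =>
          (st.1.insert lang (st.2, st.2 + n), st.2 + n))
        (d.insert x (base + i * n, base + i * n + n), base + i * n + n)).1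
        = (xs.foldl
        (fun (st : PySem.Dict String (Int × Int) × Int) lang =>
          (st.1.insert lang (st.2, st.2 + n), st.2 + n))
        (d.insert x (base + i * n, base + i * n + n), base + ((i+1 : Nat) : Int) * n)).1 := by
          push_cast; ring_nf
      _ = _ := by
          rw [ih (i+1) (d.insert x (base + i * n, base + i * n + n))]
          norm_cast

-- ===== VERDICT (by name: the statement is the Claim_ definition above) =====
theorem compute_lang_ranges_spec : Claim_equal_compute_lang_ranges := by
  intro langs base n _ hpre
  unfold Spec_compute_lang_ranges compute_lang_ranges compute_lang_ranges_alt
  match langs with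
  | [] => exact absurd rfl hpre
  | l0 :: rest =>
    have hg : PySem.List.pyGet? (l0 :: rest) 0 = some l0 := by
      simp [PySem.List.pyGet?, PySem.List.pyIdx?]
    rw [hg]
    simp only [PySem.List.slice_from_one, List.tail_cons, PySem.List.enumerate_cons,
      List.foldl_cons]
    rw [if_pos (by simp)]
    have := pv_loop_eq base n rest 0 (PySem.Dict.empty.insert l0 (0, base))
    simp only [Nat.cast_zero, zero_add] at this
    have hb : base + (0 : Int) * n = base := by ring
    rw [hb] at this
    rw [show (0:Int) + 1 = 1 by norm_num, this]
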